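-- pv_equiv track=rewrite | github.com/TerranceJYiii/Programming_challenges | AdventOfCode/AOC23/Task7_2.py | count
-- ===== SOURCE A (Python) =====
-- def count(card):
--     if card == "JJJJJ":
--         return[5]
--     J_count = card.count("J")
--     card = card.replace("J", "")
--     num_of_card = []
--     set_card = set([*card])
--     for each in set_card:
--         num_of_card.append(card.count(each))
--     num_of_card.sort()
--     num_of_card[-1] += J_count
--     return num_of_card
-- ===== SOURCE B (Python) =====
-- def _runs(chars):
--     # lengths of the maximal runs of equal consecutive characters
--     if not chars:
--         return []
--     i = 1
--     while i < len(chars) and chars[i] == chars[0]: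
--         i += 1
--     return [i] + _runs(chars[i:])
--
-- def count(card):
--     if card == "JJJJJ":
--         return [5]
--     non_j = sorted(c for c in card if c != "J")
--     counts = sorted(_runs(non_j))
--     counts[-1] += len(card) - len(non_j)
--     return counts
-- ===== Notes on version B (the rewrite author's own statement) =====
-- stated objective: alternative
-- what changed: B sorts the non-joker characters once and extracts run lengths of equal consecutive characters with a recursive groupby-style scan, instead of A's replace + set() + one full card.count scan per distinct card.
import Mathlib
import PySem

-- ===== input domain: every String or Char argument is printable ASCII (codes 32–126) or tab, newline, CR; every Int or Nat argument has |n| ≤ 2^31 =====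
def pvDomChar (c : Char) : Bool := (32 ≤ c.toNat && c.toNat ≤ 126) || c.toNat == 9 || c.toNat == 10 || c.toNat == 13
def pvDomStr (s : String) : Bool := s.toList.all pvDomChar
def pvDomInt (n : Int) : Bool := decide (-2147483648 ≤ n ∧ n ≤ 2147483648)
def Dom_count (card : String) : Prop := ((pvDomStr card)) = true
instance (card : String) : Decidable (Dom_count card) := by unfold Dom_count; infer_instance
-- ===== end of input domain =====

-- B sorts the non-joker characters once and counts runs of equal consecutive characters
-- (groupby-style), instead of A's replace + set() + one card.count scan per distinct card.

-- ===== PORT A =====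
-- 'card.count(each)' with a one-char set element 'each' is PySem.Str.count card' (String.ofList [each])
def count (card : String) : List Int :=
  if card = "JJJJJ" then [5]
  else
    let J_count : Int := (PySem.Str.count card "J" : Int)
    let card' := PySem.Str.replace card "J" ""
    let set_card : PySem.Set Char := PySem.Set.ofList card'.toList
    let num_of_card : List Int :=
      set_card.foldl (fun acc each => acc ++ [((PySem.Str.count card' (String.ofList [each])) : Int)]) []
    let num_sorted := PySem.List.sorted num_of_card (fun x => x) false
    PySem.List.pySetD num_sorted (-1) (PySem.List.pyGetD num_sorted (-1) 0 + J_count)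

-- ===== PORT B =====
-- _runs: the inner while loop finds i = 1 + length of the leading run of chars[0] in the tail
-- (List.takeWhile), and chars[i:] is the remaining suffix (List.dropWhile)
def pvRuns : List Char → List Int
  | [] => []
  | c :: t =>
      (((t.takeWhile (fun x => x == c)).length : Int) + 1) :: pvRuns (t.dropWhile (fun x => x == c))
termination_by l => l.length
decreasing_by
  simpa using Nat.lt_succ_of_le (List.length_dropWhile_le _ _)

def count_alt (card : String) : List Int :=
  if card = "JJJJJ" then [5]
  else
    let non_j := PySem.List.sorted (card.toList.filter (fun c => !(c == 'J'))) (fun x => x) false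
    let counts := PySem.List.sorted (pvRuns non_j) (fun x => x) false
    PySem.List.pySetD counts (-1)
      (PySem.List.pyGetD counts (-1) 0 + ((card.toList.length : Int) - (non_j.length : Int)))

-- ===== PRECONDITION & SPEC =====
-- Pre_ excludes exactly the inputs on which A raises IndexError: hands whose characters are
-- all jokers (or empty), other than the exact five-joker hand handled by the guard; B raises there too.
def Pre_count (card : String) : Prop :=
  card = "JJJJJ" ∨ card.toList.any (fun c => !(c == 'J')) = true
instance (card : String) : Decidable (Pre_count card) := by unfold Pre_count; infer_instance
def pvWitness_count : String := "AAJ22"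

def Spec_count (card : String) (out : List Int) : Prop := out = count_alt card
instance (card : String) (out : List Int) : Decidable (Spec_count card out) := by unfold Spec_count; infer_instance

-- ===== CLAIM (what is proved, stated in full; the proofs are below) =====
def Claim_equal_count : Prop := ∀ (card : String), Dom_count card → Pre_count card → Spec_count card (count card)

-- ===== LEMMAS AND PROOFS =====

-- single-char needle: Chars.count.go counts the occurrences of that char
lemma countGo_single (c : Char) (l : List Char) (fuel : Nat) (acc : Nat)
    (h : l.length ≤ fuel) :
    PySem.Chars.count.go [c] fuel l acc = acc + l.count c := by
  induction l generalizing fuel acc with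
  | nil => cases fuel <;> simp [PySem.Chars.count.go]
  | cons x t ih =>
    cases fuel with
    | zero => simp at h
    | succ f =>
      simp only [List.length_cons, Nat.succ_le_succ_iff] at h
      by_cases hx : x = c
      · subst hx
        simp [PySem.Chars.count.go, List.isPrefixOf, ih _ _ h]
        omega
      · simp [PySem.Chars.count.go, List.isPrefixOf, hx, ih _ _ h]
        exact fun hh => hx hh.symm

-- replacing a single char by the empty string is filtering it out
lemma replaceGo_single (c : Char) (l : List Char) (fuel : Nat) (acc : List Char)
    (h : l.length ≤ fuel) :
    PySem.Chars.replace.go [c] [] fuel l acc = acc.reverse ++ l.filter (fun x => !(x == c)) := by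
  induction l generalizing fuel acc with
  | nil => cases fuel <;> simp [PySem.Chars.replace.go]
  | cons x t ih =>
    cases fuel with
    | zero => simp at h
    | succ f =>
      simp only [List.length_cons, Nat.succ_le_succ_iff] at h
      by_cases hx : x = c
      · subst hx
        simp [PySem.Chars.replace.go, List.isPrefixOf, ih _ _ h]
      · simp [PySem.Chars.replace.go, List.isPrefixOf, hx, ih _ _ h, Ne.symm hx]

lemma chars_count_single (c : Char) (l : List Char) :
    PySem.Chars.count l [c] = l.count c := by
  simpa [PySem.Chars.count] using countGo_single c l l.length 0 le_rfl

lemma chars_replace_single (c : Char) (l : List Char) :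
    PySem.Chars.replace l [c] [] = l.filter (fun x => !(x == c)) := by
  simpa [PySem.Chars.replace] using replaceGo_single c l l.length [] le_rfl

-- on a (≤)-sorted list, pvRuns yields exactly the counts of the distinct elements
lemma pvRuns_perm_of_sorted (s : List Char) :
    s.Pairwise (· ≤ ·) →
    (pvRuns s).Perm ((PySem.Set.ofList s).map (fun d => (s.count d : Int))) := by
  induction s using pvRuns.induct with
  | case1 => intro _; simp [pvRuns]
  | case2 c t ih =>
    intro hs
    rw [List.pairwise_cons] at hs
    obtain ⟨hc, ht⟩ := hs
    set t1 := t.takeWhile (fun x => x == c) with ht1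
    set t2 := t.dropWhile (fun x => x == c) with ht2
    have h12 : t1 ++ t2 = t := List.takeWhile_append_dropWhile
    have hall1 : ∀ x ∈ t1, x = c := by
      intro x hx
      rw [ht1] at hx
      exact eq_of_beq (List.mem_takeWhile_imp (p := fun x => x == c) hx)
    have ht2p : t2.Pairwise (· ≤ ·) :=
      List.Pairwise.sublist (List.dropWhile_sublist _) ht
    -- every element of t2 is strictly above c, hence c ∉ t2
    have hnc : c ∉ t2 := by
      intro hmem
      cases hc2 : t2 with
      | nil => rw [hc2] at hmem; simp at hmem
      | cons y r =>
        have hy : (y == c) = false := by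
          have h1 : t.dropWhile (fun x => x == c) ≠ [] := by rw [← ht2, hc2]; simp
          have := List.head_dropWhile_not (l := t) (p := fun x => x == c) h1
          simpa [← ht2, hc2] using this
        have hyne : y ≠ c := by simpa using hy
        have hyt : y ∈ t := by
          have : y ∈ t2 := by rw [hc2]; simp
          rw [ht2] at this
          exact (List.dropWhile_sublist _).subset this
        have hcy : c < y := lt_of_le_of_ne (hc y hyt) (Ne.symm hyne)
        rw [hc2] at hmem ht2p
        rcases List.mem_cons.mp hmem with h | h
        · exact hyne h.symm
        · have := (List.pairwise_cons.mp ht2p).1 c h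
          exact absurd (lt_of_lt_of_le hcy this) (lt_irrefl c)
    -- counts
    have hcount1 : t1.count c = t1.length :=
      List.count_eq_length.mpr (fun b hb => (hall1 b hb).symm)
    have hcount2 : t2.count c = 0 := List.count_eq_zero.mpr hnc
    have hheadcount : (c :: t).count c = t1.length + 1 := by
      rw [List.count_cons_self, ← h12, List.count_append, hcount1, hcount2]
    -- the distinct elements of c :: t are c followed by those of t2
    have hperm : (PySem.Set.ofList (c :: t)).Perm (c :: PySem.Set.ofList t2) := by
      refine (List.perm_ext_iff_of_nodup (PySem.Set.nodup_ofList _) ?_).mpr ?_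
      · exact List.nodup_cons.mpr ⟨by simpa [PySem.Set.mem_ofList] using hnc,
          PySem.Set.nodup_ofList _⟩
      · intro x
        simp only [PySem.Set.mem_ofList, List.mem_cons, ← h12, List.mem_append]
        constructor
        · rintro (h | h | h)
          · exact Or.inl h
          · exact Or.inl (hall1 x h)
          · exact Or.inr (by simpa [PySem.Set.mem_ofList] using h)
        · rintro (h | h)
          · exact Or.inl h
          · exact Or.inr (Or.inr (by simpa [PySem.Set.mem_ofList] using h))
    -- map over it, and rewrite the counts of the tail elements to counts in t2
    have hmapeq : (PySem.Set.ofList t2).map (fun d => (((c :: t).count d : Nat) : Int))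
        = (PySem.Set.ofList t2).map (fun d => (t2.count d : Int)) := by
      refine List.map_congr_left ?_
      intro d hd
      have hdt2 : d ∈ t2 := by simpa [PySem.Set.mem_ofList] using hd
      have hdc : d ≠ c := fun h => hnc (h ▸ hdt2)
      have h0 : t1.count d = 0 := List.count_eq_zero.mpr (fun h => hdc (hall1 d h))
      have : (c :: t).count d = t2.count d := by
        rw [← h12]
        simp [List.count_append, Ne.symm hdc, h0]
      rw [this]
    have heq : (((t1.length : Int) + 1) :: (PySem.Set.ofList t2).map (fun d => (t2.count d : Int)))
        = (c :: PySem.Set.ofList t2).map (fun d => (((c :: t).count d : Nat) : Int)) := by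
      rw [List.map_cons, hheadcount, hmapeq]
      push_cast
      ring_nf
    have hstep : pvRuns (c :: t) = (((t1.length : Int) + 1) :: pvRuns t2) := by rw [pvRuns]
    rw [hstep]
    refine (List.Perm.cons _ (ih ht2p)).trans ?_
    rw [heq]
    exact (hperm.map _).symm

-- ===== VERDICT (by name: the statement is the Claim_ definition above) =====
theorem count_spec : Claim_equal_count := by
  intro card _ _
  unfold Spec_count count count_alt
  by_cases h5 : card = "JJJJJ"
  · simp [h5]
  · simp only [h5, if_false]
    set fl := card.toList.filter (fun x => !(x == 'J')) with hfl
    have hrep : (PySem.Str.replace card "J" "").toList = fl := by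
      simp [PySem.Str.toList_replace, chars_replace_single, hfl]
    -- A's appended counts list
    have hA : (PySem.Set.ofList (PySem.Str.replace card "J" "").toList).foldl
        (fun acc each => acc ++ [((PySem.Str.count (PySem.Str.replace card "J" "") (String.ofList [each])) : Int)]) []
        = (PySem.Set.ofList fl).map (fun each => (fl.count each : Int)) := by
      rw [PySem.List.foldl_append_singleton_eq_map]
      rw [hrep]
      refine List.map_congr_left ?_
      intro a _
      have h1 : (String.ofList [a]).toList = [a] := Eq.symm ((fun {l} {s} => String.ofList_eq.mp) rfl)
      simp only [PySem.Str.count, h1, hrep, chars_count_single]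
    rw [hA]
    -- J_count = len(card) - len(non_j)
    have hlen : (PySem.Str.count card "J" : Int)
        = (card.toList.length : Int) - (fl.length : Int) := by
      have h1 : fl.length + card.toList.count 'J' = card.toList.length := by
        rw [hfl]
        induction card.toList with
        | nil => simp
        | cons x t ih => by_cases hx : x = 'J' <;> simp [hx] <;> omega
      have h2 : card.toList.length = card.length := by simp
      simp [PySem.Str.count, chars_count_single]
      omega
    -- B's sorted runs list equals A's sorted counts list
    have hsorted : PySem.List.sorted
          (pvRuns (PySem.List.sorted fl (fun x => x) false)) (fun x => x) false
        = PySem.List.sorted ((PySem.Set.ofList fl).map (fun each => (fl.count each : Int)))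
            (fun x => x) false := by
      apply (PySem.List.sorted_id_eq_sorted_id_iff_perm _ _).mpr
      set sfl := PySem.List.sorted fl (fun x => x) false with hsfl
      have hp : sfl.Perm fl := PySem.List.sorted_perm fl (fun x => x) false
      have hset : (PySem.Set.ofList sfl).Perm (PySem.Set.ofList fl) := by
        refine (List.perm_ext_iff_of_nodup (PySem.Set.nodup_ofList _)
          (PySem.Set.nodup_ofList _)).mpr ?_
        intro x
        simp only [PySem.Set.mem_ofList]
        exact ⟨fun h => hp.subset h, fun h => hp.symm.subset h⟩
      refine (pvRuns_perm_of_sorted sfl (PySem.List.sorted_pairwise fl (fun x => x))).trans ?_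
      have hmapc : (PySem.Set.ofList sfl).map (fun d => (sfl.count d : Int))
          = (PySem.Set.ofList sfl).map (fun d => (fl.count d : Int)) := by
        refine List.map_congr_left ?_
        intro d _
        rw [hp.count_eq]
      rw [hmapc]
      exact hset.map _
    rw [hsorted, hlen]
    simp [PySem.List.length_sorted]
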